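-- pv_equiv track=rewrite | github.com/ggomarr/NLTK | src/root/scrapbook_ch_06.py | ex10_find_noun
-- ===== SOURCE A (Python) =====
-- def ex10_find_noun(sent,target_pos,valid_pos_lst=['NN','NP'],splitters='(),.-:?!',search_range=5):
--     pos_noun=None
--     if target_pos+1<len(sent):
--         for i in range(target_pos+1,min(target_pos+1+search_range,len(sent))):
--             if sum([ valid_pos in sent[i][1] for valid_pos in valid_pos_lst ]):
--                 pos_noun=i
--                 break
--             if sent[i][1] in splitters:
--                 break
--     return pos_noun
-- ===== SOURCE B (Python) =====
-- def ex10_find_noun(sent,target_pos,valid_pos_lst=['NN','NP'],splitters='(),.-:?!',search_range=5):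
--     if target_pos+1 >= len(sent):
--         return None
--     idxs = range(target_pos+1, min(target_pos+1+search_range, len(sent)))
--     noun_i = next((i for i in idxs if any(vp in sent[i][1] for vp in valid_pos_lst)), None)
--     if noun_i is None:
--         return None
--     split_i = next((i for i in idxs if sent[i][1] in splitters), None)
--     return noun_i if split_i is None or noun_i <= split_i else None
-- ===== Notes on version B (the rewrite author's own statement) =====
-- stated objective: idiomatic
-- what changed: Replaces A's single stateful break-driven loop by two independent first-match scans (next over generator expressions) for the first noun index and the first splitter index over the same window, combined by comparing the two positions.
import Mathlib
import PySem

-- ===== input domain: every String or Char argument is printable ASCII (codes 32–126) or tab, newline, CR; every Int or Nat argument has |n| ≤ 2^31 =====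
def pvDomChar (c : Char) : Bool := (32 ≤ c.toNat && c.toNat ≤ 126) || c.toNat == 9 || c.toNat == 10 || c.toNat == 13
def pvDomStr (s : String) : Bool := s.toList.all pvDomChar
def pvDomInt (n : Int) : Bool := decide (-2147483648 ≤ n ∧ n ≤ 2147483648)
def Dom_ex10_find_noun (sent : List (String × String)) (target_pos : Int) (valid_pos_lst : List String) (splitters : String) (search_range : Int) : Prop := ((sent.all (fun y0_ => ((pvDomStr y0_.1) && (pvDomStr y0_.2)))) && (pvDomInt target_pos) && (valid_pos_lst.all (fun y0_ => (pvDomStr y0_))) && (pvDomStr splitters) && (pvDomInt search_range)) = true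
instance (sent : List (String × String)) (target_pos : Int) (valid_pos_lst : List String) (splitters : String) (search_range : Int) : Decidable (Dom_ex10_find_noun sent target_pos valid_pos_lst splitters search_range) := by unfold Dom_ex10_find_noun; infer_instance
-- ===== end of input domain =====

-- B replaces A's single stateful break-driven loop by two independent first-match
-- scans over the same index window (first noun index, first splitter index),
-- combined by comparing positions; objective: idiomatic. A = B on Pre_ (where A
-- does not raise IndexError via negative-index underflow).


-- ===== PORT A =====
-- the for-loop with its two breaks; `none` at an out-of-range index is Python's
-- IndexError (excluded by Pre_)
def exA_loop (sent : List (String × String)) (valid_pos_lst : List String) (splitters : String) : List Int → Option Int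
  | [] => none
  | i :: rest =>
    match PySem.List.pyGet? sent i with
    | none => none
    | some p =>
      if 0 < (valid_pos_lst.map (fun vp => if PySem.Str.isIn vp p.2 then (1 : Int) else 0)).sum then
        some i
      else if PySem.Str.isIn p.2 splitters then
        none
      else
        exA_loop sent valid_pos_lst splitters rest

def ex10_find_noun (sent : List (String × String)) (target_pos : Int) (valid_pos_lst : List String) (splitters : String) (search_range : Int) : Option Int :=
  if target_pos + 1 < (sent.length : Int) then
    exA_loop sent valid_pos_lst splitters
      (PySem.List.pyRange (target_pos + 1) (min (target_pos + 1 + search_range) (sent.length : Int)) 1)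
  else
    none

-- ===== PORT B =====
def exB_nounHit (sent : List (String × String)) (valid_pos_lst : List String) (i : Int) : Bool :=
  match PySem.List.pyGet? sent i with
  | some p => valid_pos_lst.any (fun vp => PySem.Str.isIn vp p.2)
  | none => false

def exB_splitHit (sent : List (String × String)) (splitters : String) (i : Int) : Bool :=
  match PySem.List.pyGet? sent i with
  | some p => PySem.Str.isIn p.2 splitters
  | none => false

def ex10_find_noun_alt (sent : List (String × String)) (target_pos : Int) (valid_pos_lst : List String) (splitters : String) (search_range : Int) : Option Int :=
  if (sent.length : Int) ≤ target_pos + 1 then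
    none
  else
    let idxs := PySem.List.pyRange (target_pos + 1) (min (target_pos + 1 + search_range) (sent.length : Int)) 1
    match idxs.find? (exB_nounHit sent valid_pos_lst) with
    | none => none
    | some n =>
      match idxs.find? (exB_splitHit sent splitters) with
      | none => some n
      | some s => if n ≤ s then some n else none

-- ===== PRECONDITION & SPEC =====
-- Pre_ excludes exactly the inputs where A raises IndexError: a nonempty search
-- window whose first index target_pos+1 is below -len(sent) (Python negative
-- indexing underflows).  B raises there too.
def Pre_ex10_find_noun (sent : List (String × String)) (target_pos : Int) (valid_pos_lst : List String) (splitters : String) (search_range : Int) : Prop :=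
  ¬ (target_pos + 1 < (sent.length : Int) ∧ 1 ≤ search_range ∧ target_pos + 1 < -(sent.length : Int))
instance (sent : List (String × String)) (target_pos : Int) (valid_pos_lst : List String) (splitters : String) (search_range : Int) : Decidable (Pre_ex10_find_noun sent target_pos valid_pos_lst splitters search_range) := by unfold Pre_ex10_find_noun; infer_instance

def pvWitness_ex10_find_noun : (List (String × String)) × Int × List String × String × Int :=
  ([("the", "DT"), ("red", "JJ"), ("cat", "NN")], 0, ["NN", "NP"], "(),.-:?!", 5)

def Spec_ex10_find_noun (sent : List (String × String)) (target_pos : Int) (valid_pos_lst : List String) (splitters : String) (search_range : Int) (out : Option Int) : Prop := out = ex10_find_noun_alt sent target_pos valid_pos_lst splitters search_range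
instance (sent : List (String × String)) (target_pos : Int) (valid_pos_lst : List String) (splitters : String) (search_range : Int) (out : Option Int) : Decidable (Spec_ex10_find_noun sent target_pos valid_pos_lst splitters search_range out) := by unfold Spec_ex10_find_noun; infer_instance

-- ===== CLAIM (what is proved, stated in full; the proofs are below) =====
def Claim_equal_ex10_find_noun : Prop := ∀ (sent : List (String × String)) (target_pos : Int) (valid_pos_lst : List String) (splitters : String) (search_range : Int), Dom_ex10_find_noun sent target_pos valid_pos_lst splitters search_range → Pre_ex10_find_noun sent target_pos valid_pos_lst splitters search_range → Spec_ex10_find_noun sent target_pos valid_pos_lst splitters search_range (ex10_find_noun sent target_pos valid_pos_lst splitters search_range)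

-- ===== LEMMAS AND PROOFS =====

-- A's truthiness test `sum([vp in tag ...])` is B's `any`
lemma exA_sum_pos_iff_any (valid_pos_lst : List String) (t : String) :
    (0 < (valid_pos_lst.map (fun vp => if PySem.Str.isIn vp t then (1 : Int) else 0)).sum)
      ↔ valid_pos_lst.any (fun vp => PySem.Str.isIn vp t) = true := by
  rw [PySem.List.sum_map_ite_one_zero]
  rw [List.any_eq_true]
  constructor
  · intro h
    have := List.countP_pos_iff (p := fun vp => PySem.Str.isIn vp t) (l := valid_pos_lst)
    exact this.mp (by exact_mod_cast h)
  · intro h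
    have := (List.countP_pos_iff (p := fun vp => PySem.Str.isIn vp t) (l := valid_pos_lst)).mpr h
    exact_mod_cast this

-- A's break-loop equals B's two first-match scans, on any strictly increasing
-- index list all of whose indices are in range
lemma exA_loop_eq_find (sent : List (String × String)) (valid_pos_lst : List String) (splitters : String) :
    ∀ (l : List Int), l.Pairwise (· < ·) → (∀ i ∈ l, (PySem.List.pyGet? sent i).isSome) →
      exA_loop sent valid_pos_lst splitters l =
        (match l.find? (exB_nounHit sent valid_pos_lst) with
         | none => none
         | some n =>
           match l.find? (exB_splitHit sent splitters) with
           | none => some n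
           | some s => if n ≤ s then some n else none) := by
  intro l
  induction l with
  | nil => intro _ _; simp [exA_loop]
  | cons i rest ih =>
    intro hpw hsome
    obtain ⟨p, hp⟩ := Option.isSome_iff_exists.mp (hsome i (by simp))
    have hrest : ∀ j ∈ rest, (PySem.List.pyGet? sent j).isSome := fun j hj => hsome j (by simp [hj])
    have hlt : ∀ j ∈ rest, i < j := fun j hj => (List.pairwise_cons.mp hpw).1 j hj
    have hpwr : rest.Pairwise (· < ·) := (List.pairwise_cons.mp hpw).2
    by_cases hn : exB_nounHit sent valid_pos_lst i
    · -- noun found at i: A returns some i; B's first noun index is i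
      have hsum : 0 < (valid_pos_lst.map (fun vp => if PySem.Str.isIn vp p.2 then (1 : Int) else 0)).sum := by
        rw [exA_sum_pos_iff_any]
        have := hn
        simp only [exB_nounHit, hp] at this
        exact this
      rw [List.find?_cons_of_pos hn]
      simp only [exA_loop, hp, if_pos hsum]
      by_cases hs : exB_splitHit sent splitters i
      · rw [List.find?_cons_of_pos hs]; simp
      · rw [List.find?_cons_of_neg (by simpa using hs)]
        cases hfs : rest.find? (exB_splitHit sent splitters) with
        | none => rfl
        | some s =>
          have : i < s := hlt s (List.mem_of_find?_eq_some hfs)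
          simp [le_of_lt this]
    · -- no noun at i
      have hsum : ¬ 0 < (valid_pos_lst.map (fun vp => if PySem.Str.isIn vp p.2 then (1 : Int) else 0)).sum := by
        rw [exA_sum_pos_iff_any]
        simpa [exB_nounHit, hp] using hn
      rw [List.find?_cons_of_neg (by simpa using hn)]
      by_cases hs : exB_splitHit sent splitters i
      · -- splitter at i: A breaks with none; B's first splitter is i, before any later noun
        have hsin : PySem.Str.isIn p.2 splitters = true := by
          simpa [exB_splitHit, hp] using hs
        simp only [exA_loop, hp, if_neg hsum, if_pos hsin]
        rw [List.find?_cons_of_pos hs]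
        cases hfn : rest.find? (exB_nounHit sent valid_pos_lst) with
        | none => rfl
        | some n =>
          have : i < n := hlt n (List.mem_of_find?_eq_some hfn)
          simp [not_le.mpr this]
      · -- neither: both skip i
        have hsin : PySem.Str.isIn p.2 splitters = false := by
          simpa [exB_splitHit, hp] using hs
        simp only [exA_loop, hp, if_neg hsum, hsin, Bool.false_eq_true, if_neg (by simp : ¬False)]
        rw [List.find?_cons_of_neg (by simpa using hs)]
        exact ih hpwr hrest

-- ===== VERDICT (by name: the statement is the Claim_ definition above) =====
theorem ex10_find_noun_spec : Claim_equal_ex10_find_noun := by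
  intro sent target_pos valid_pos_lst splitters search_range _hdom hpre
  unfold Spec_ex10_find_noun ex10_find_noun ex10_find_noun_alt
  by_cases h : target_pos + 1 < (sent.length : Int)
  · rw [if_pos h, if_neg (by omega)]
    have hinrange : ∀ i ∈ PySem.List.pyRange (target_pos + 1) (min (target_pos + 1 + search_range) (sent.length : Int)) 1,
        (PySem.List.pyGet? sent i).isSome := by
      intro i hi
      rw [PySem.List.mem_pyRange_one] at hi
      unfold Pre_ex10_find_noun at hpre
      have hb : i < (sent.length : Int) := by omega
      have ha : -(sent.length : Int) ≤ i := by omega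
      cases hg : PySem.List.pyGet? sent i with
      | some p => simp
      | none =>
        rw [PySem.List.pyGet?_eq_none_iff] at hg
        exact absurd (by simp [PySem.Raise.InRange]; omega) hg
    exact exA_loop_eq_find sent valid_pos_lst splitters _ (PySem.List.pairwise_lt_pyRange_one _ _) hinrange
  · rw [if_neg h, if_pos (by omega)]
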